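-- pv_equiv track=rewrite | github.com/anon-noob/mothballapp | CodeCell.py | parse
-- ===== SOURCE A (Python) =====
-- def parse(text: str) -> list[str]:
--     """
--     Parses the text, separating whenever the following symbols is encountered: `(){}\\#.| \\n\\t,=+*-/:`
--
--     Returning a list containing all elements
--     """
--     tokens = []
--     follows_backslash = False
--     word = ""
--     for char in text:
--         if follows_backslash:
--             word += char
--             tokens.append(word)
--             word = ""
--             follows_backslash = False
--
--         elif char in "(){}[]\\#.| \n\t,=+*-/:":
--             tokens.append(word) if word else None
--             tokens.append(char)
--             word = ""
--
--             if char == "\\":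
--                 follows_backslash = True
--
--         else:
--             word += char
--
--     return tokens
-- ===== SOURCE B (Python) =====
-- DELIMS = frozenset("(){}[]\\#.| \n\t,=+*-/:")
--
--
-- def _chunks(seg):
--     """Split a backslash-free segment into maximal runs of same-class chars,
--     as (is_delimiter, run) pairs."""
--     res = []
--     i, n = 0, len(seg)
--     while i < n:
--         d = seg[i] in DELIMS
--         j = i + 1
--         while j < n and (seg[j] in DELIMS) == d:
--             j += 1
--         res.append((d, seg[i:j]))
--         i = j
--     return res
--
--
-- def _tok(seg, terminated):
--     """Tokens of a backslash-free segment: delimiter runs explode into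
--     single-char tokens; a word run is a token when a delimiter follows it
--     (inside the segment, or - if `terminated` - right after the segment)."""
--     out = []
--     chs = _chunks(seg)
--     for k, (d, run) in enumerate(chs):
--         if d:
--             out.extend(run)
--         elif terminated or k + 1 < len(chs):
--             out.append(run)
--     return out
--
--
-- def parse(text: str) -> list[str]:
--     segs = text.split("\\")
--     last = len(segs) - 1
--     tokens = _tok(segs[0], 0 < last)
--     i = 1
--     while i <= last:
--         tokens.append("\\")
--         seg = segs[i]
--         if seg:
--             # the char right after the backslash is its own token
--             tokens.append(seg[0])
--             tokens.extend(_tok(seg[1:], i < last))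
--             i += 1
--         elif i < last:
--             # empty segment between two backslashes: the escaped char is the
--             # second backslash itself, which therefore starts no escape
--             tokens.append("\\")
--             tokens.extend(_tok(segs[i + 1], i + 1 < last))
--             i += 2
--         else:
--             # trailing backslash escapes nothing
--             i += 1
--     return tokens
-- ===== Notes on version B (the rewrite author's own statement) =====
-- stated objective: alternative
-- what changed: Replaced A's char-at-a-time state machine (follows_backslash flag) by a staged algorithm: split the text on backslashes to resolve the escape layer, then tokenize each backslash-free segment by chunking it into maximal same-class runs, exploding delimiter runs and emitting delimiter-terminated word runs.
import Mathlib
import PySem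

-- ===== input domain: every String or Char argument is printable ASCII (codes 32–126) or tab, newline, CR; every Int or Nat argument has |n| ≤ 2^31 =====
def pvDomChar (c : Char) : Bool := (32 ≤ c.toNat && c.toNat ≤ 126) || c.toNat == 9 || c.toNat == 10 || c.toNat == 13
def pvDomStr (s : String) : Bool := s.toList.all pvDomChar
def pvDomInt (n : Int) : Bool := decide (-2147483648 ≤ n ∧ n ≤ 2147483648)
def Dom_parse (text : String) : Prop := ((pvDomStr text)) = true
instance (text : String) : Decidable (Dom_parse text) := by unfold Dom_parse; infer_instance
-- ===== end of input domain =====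

-- B replaces A's char-at-a-time state machine (follows_backslash flag) by a staged
-- algorithm: split on backslashes, then tokenize each backslash-free segment by
-- chunking it into maximal same-class runs (objective: alternative, same O(n) cost).

-- the delimiter character set "(){}[]\#.| \n\t,=+*-/:"
def pvDelims : List Char := "(){}[]\\#.| \n\t,=+*-/:".toList

-- ===== PORT A =====
-- state = (tokens, follows_backslash, word); word kept as its character list
-- (Python `word += char` is `word ++ [c]`, `tokens.append(word)` wraps it as a String)
def parseStepA (st : List String × Bool × List Char) (c : Char) : List String × Bool × List Char :=
  let (tokens, flag, word) := st
  if flag then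
    (tokens ++ [String.ofList (word ++ [c])], false, [])
  else if pvDelims.contains c then
    ((if word ≠ [] then tokens ++ [String.ofList word] else tokens) ++ [String.ofList [c]],
     c == '\\', [])
  else
    (tokens, flag, word ++ [c])

def parse (text : String) : List String :=
  (text.toList.foldl parseStepA ([], false, [])).1

-- ===== PORT B =====
-- hand port of Python's text.split("\\") (exact for a single-character separator),
-- returned as (segs[0], segs[1:]) since Source B uses exactly that decomposition
def psplit (cs : List Char) : List Char × List (List Char) :=
  match cs with
  | [] => ([], [])
  | c :: rest =>
    let (s, ss) := psplit rest
    if c = '\\' then ([], s :: ss) else (c :: s, ss)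

-- _chunks: maximal runs of same-class (delimiter / non-delimiter) characters
def chunksB (seg : List Char) : List (Bool × List Char) :=
  match seg with
  | [] => []
  | c :: rest =>
    let d := pvDelims.contains c
    (d, c :: rest.takeWhile (fun x => pvDelims.contains x == d)) ::
      chunksB (rest.dropWhile (fun x => pvDelims.contains x == d))
termination_by seg.length
decreasing_by
  simpa using Nat.lt_succ_of_le (List.length_dropWhile_le _ _)

-- _tok's loop over the chunk list (`k + 1 < len(chs)` of Source B is `rest ≠ []`)
def tokRuns (terminated : Bool) (chs : List (Bool × List Char)) : List String :=
  match chs with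
  | [] => []
  | (d, run) :: rest =>
    if d then run.map (fun c => String.ofList [c]) ++ tokRuns terminated rest
    else if terminated || rest ≠ [] then String.ofList run :: tokRuns terminated rest
    else tokRuns terminated rest

def tokB (seg : List Char) (terminated : Bool) : List String :=
  tokRuns terminated (chunksB seg)

-- Source B's while loop over segs[1:] (one "\" token per separator; a nonempty segment's
-- first char is the escaped token; an empty segment escapes the following backslash)
def parseRestB (segs : List (List Char)) : List String :=
  match segs with
  | [] => []
  | (c :: tl) :: rest => "\\" :: String.ofList [c] :: (tokB tl (rest ≠ []) ++ parseRestB rest)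
  | [] :: r2 :: rest' => "\\" :: "\\" :: (tokB r2 (rest' ≠ []) ++ parseRestB rest')
  | [[]] => ["\\"]

def parse_alt (text : String) : List String :=
  let (s, ss) := psplit text.toList
  tokB s (ss ≠ []) ++ parseRestB ss

-- ===== PRECONDITION & SPEC =====
def Spec_parse (text : String) (out : List String) : Prop := out = parse_alt text
instance (text : String) (out : List String) : Decidable (Spec_parse text out) := by unfold Spec_parse; infer_instance

-- ===== CLAIM (what is proved, stated in full; the proofs are below) =====
def Claim_equal_parse : Prop := ∀ (text : String), Dom_parse text → Spec_parse text (parse text)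

-- ===== LEMMAS AND PROOFS =====

-- proof-only helpers: A's word flush, and B's value on a remaining suffix
def flushS (w : List Char) : List String := if w ≠ [] then [String.ofList w] else []

def Bfrom (w cs : List Char) : List String :=
  tokB (w ++ (psplit cs).1) ((psplit cs).2 ≠ []) ++ parseRestB (psplit cs).2

def escToks (cs : List Char) : List String :=
  match cs with
  | [] => []
  | c :: cs' => String.ofList [c] :: Bfrom [] cs'

theorem takeWhile_all_append (p : Char → Bool) (l : List Char) (hl : ∀ x ∈ l, p x = true)
    (c : Char) (hc : p c = false) (s : List Char) :
    (l ++ c :: s).takeWhile p = l ∧ (l ++ c :: s).dropWhile p = c :: s := by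
  induction l with
  | nil => simp [hc]
  | cons a l ihl =>
    have ha : p a = true := hl a (by simp)
    have h2 := ihl (fun x hx => hl x (by simp [hx]))
    simp [ha, h2.1, h2.2]

theorem chunks_nil : chunksB [] = [] := by rw [chunksB]

theorem chunks_free (w : List Char) (hw : ∀ x ∈ w, x ∉ pvDelims)
    (hne : w ≠ []) : chunksB w = [(false, w)] := by
  cases w with
  | nil => exact absurd rfl hne
  | cons c rest =>
    have hc : c ∉ pvDelims := hw c (by simp)
    have ht : rest.takeWhile (fun x => pvDelims.contains x == pvDelims.contains c) = rest := by
      rw [List.takeWhile_eq_self_iff]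
      intro x hx
      have := hw x (by simp [hx])
      simp [this, hc]
    have hd : rest.dropWhile (fun x => pvDelims.contains x == pvDelims.contains c) = [] := by
      rw [List.dropWhile_eq_nil_iff]
      intro x hx
      have := hw x (by simp [hx])
      simp [this, hc]
    rw [chunksB]
    simp only [ht, hd, chunks_nil]
    simp [hc]

theorem chunks_ne (s : List Char) (h : s ≠ []) : chunksB s ≠ [] := by
  cases s with
  | nil => exact absurd rfl h
  | cons c rest => rw [chunksB]; simp

theorem tok_free_false (w : List Char) (hw : ∀ x ∈ w, x ∉ pvDelims) :
    tokB w false = [] := by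
  by_cases hne : w = []
  · subst hne; simp [tokB, chunks_nil, tokRuns]
  · simp [tokB, chunks_free w hw hne, tokRuns]

theorem tok_free_true (w : List Char) (hw : ∀ x ∈ w, x ∉ pvDelims) :
    tokB w true = flushS w := by
  by_cases hne : w = []
  · subst hne; simp [tokB, chunks_nil, tokRuns, flushS]
  · simp [tokB, chunks_free w hw hne, tokRuns, flushS, hne]

theorem tok_delim_cons (c : Char) (hc : c ∈ pvDelims) (s : List Char) (b : Bool) :
    tokB (c :: s) b = String.ofList [c] :: tokB s b := by
  rw [tokB, chunksB, tokRuns]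
  have key : (s.takeWhile (fun x => pvDelims.contains x == pvDelims.contains c)).map
        (fun c => String.ofList [c]) ++
        tokRuns b (chunksB (s.dropWhile (fun x => pvDelims.contains x == pvDelims.contains c))) =
      tokRuns b (chunksB s) := by
    match s with
    | [] => simp [chunks_nil]
    | x :: xs =>
      by_cases hx : x ∈ pvDelims
      · conv_rhs => rw [chunksB, tokRuns]
        simp [hx, hc]
      · simp [hx, hc]
  simp [hc, tokB] at key ⊢
  rw [← key]

theorem tok_word_prefix (w : List Char) (hw : ∀ x ∈ w, x ∉ pvDelims)
    (hne : w ≠ []) (c : Char) (hc : c ∈ pvDelims) (s : List Char) (b : Bool) :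
    tokB (w ++ c :: s) b = String.ofList w :: tokB (c :: s) b := by
  cases w with
  | nil => exact absurd rfl hne
  | cons w0 wt =>
    have h0 : w0 ∉ pvDelims := hw w0 (by simp)
    have hta := takeWhile_all_append (fun x => pvDelims.contains x == pvDelims.contains w0)
      wt (fun x hx => by have := hw x (by simp [hx]); simp [this, h0]) c (by simp [hc, h0]) s
    rw [tokB]
    simp only [List.cons_append]
    rw [chunksB]
    rw [hta.1, hta.2, tokRuns]
    have hcne := chunks_ne (c :: s) (by simp)
    simp [h0, hcne, tokB]

theorem tok_split (w : List Char) (hw : ∀ x ∈ w, x ∉ pvDelims)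
    (c : Char) (hc : c ∈ pvDelims) (s : List Char) (b : Bool) :
    tokB (w ++ c :: s) b = flushS w ++ String.ofList [c] :: tokB s b := by
  by_cases hne : w = []
  · subst hne; simp [flushS, tok_delim_cons c hc s b]
  · rw [tok_word_prefix w hw hne c hc s b, tok_delim_cons c hc s b]
    simp [flushS, hne]

theorem prhead (cs : List Char) :
    parseRestB ((psplit cs).1 :: (psplit cs).2) = "\\" :: escToks cs := by
  match cs with
  | [] => rfl
  | c :: cs' =>
    by_cases hbs : c = '\\'
    · subst hbs
      rw [psplit]
      simp only [reduceIte]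
      rw [parseRestB.eq_def, escToks, Bfrom]
      simp
    · rw [psplit]
      simp only [if_neg hbs]
      rw [parseRestB, escToks, Bfrom]
      simp

theorem bs_lit : String.ofList ['\\'] = "\\" := by decide

theorem mainPQ (n : Nat) : ∀ cs : List Char, cs.length ≤ n →
    ((∀ (t : List String) (w : List Char), (∀ x ∈ w, x ∉ pvDelims) →
        (cs.foldl parseStepA (t, false, w)).1 = t ++ Bfrom w cs) ∧
     (∀ t : List String, (cs.foldl parseStepA (t, true, [])).1 = t ++ escToks cs)) := by
  induction n with
  | zero =>
    intro cs hlen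
    have hnil : cs = [] := List.length_eq_zero_iff.mp (Nat.le_zero.mp hlen)
    subst hnil
    constructor
    · intro t w hw
      simp [List.foldl, Bfrom, psplit, parseRestB, tok_free_false w hw]
    · intro t; simp [List.foldl, escToks]
  | succ n ih =>
    intro cs hlen
    constructor
    · intro t w hw
      match cs with
      | [] =>
        simp [List.foldl, Bfrom, psplit, parseRestB, tok_free_false w hw]
      | c :: cs' =>
        have hlen' : cs'.length ≤ n := by simpa using hlen
        by_cases hd : c ∈ pvDelims
        · by_cases hbs : c = '\\'
          · subst hbs
            have hstep : parseStepA (t, false, w) '\\' =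
                ((if w ≠ [] then t ++ [String.ofList w] else t) ++ [String.ofList ['\\']],
                 true, []) := by
              simp [parseStepA, hd]
            rw [List.foldl, hstep]
            rw [(ih cs' hlen').2
              ((if w ≠ [] then t ++ [String.ofList w] else t) ++ [String.ofList ['\\']])]
            rw [Bfrom, psplit]
            simp only [reduceIte]
            rw [prhead cs']
            have hb : (psplit cs').1 :: (psplit cs').2 ≠ [] := by simp
            simp only [List.append_nil]
            rw [decide_eq_true hb, tok_free_true w hw]
            by_cases hne : w = [] <;> simp [flushS, hne, bs_lit]
          · have hstep : parseStepA (t, false, w) c =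
                ((if w ≠ [] then t ++ [String.ofList w] else t) ++ [String.ofList [c]],
                 false, []) := by
              simp [parseStepA, hd, hbs]
            rw [List.foldl, hstep]
            rw [(ih cs' hlen').1
              ((if w ≠ [] then t ++ [String.ofList w] else t) ++ [String.ofList [c]]) [] (by simp)]
            rw [Bfrom, Bfrom, psplit]
            simp only [if_neg hbs]
            have hts := tok_split w hw c hd ((psplit cs').1) ((psplit cs').2 ≠ [])
            simp only [List.nil_append]
            rw [hts]
            by_cases hne : w = [] <;> simp [flushS, hne]
        · have hstep : parseStepA (t, false, w) c = (t, false, w ++ [c]) := by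
            simp [parseStepA, hd]
          rw [List.foldl, hstep]
          have hbs : ¬ c = '\\' := by
            intro h; subst h; simp [pvDelims] at hd
          rw [(ih cs' hlen').1 t (w ++ [c])
            (by intro x hx
                rcases List.mem_append.mp hx with h | h
                · exact hw x h
                · simp at h; subst h; exact hd)]
          rw [Bfrom, Bfrom, psplit]
          simp only [if_neg hbs]
          simp
    · intro t
      match cs with
      | [] => simp [List.foldl, escToks]
      | c :: cs' =>
        have hlen' : cs'.length ≤ n := by simpa using hlen
        have hstep : parseStepA (t, true, []) c = (t ++ [String.ofList [c]], false, []) := by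
          simp [parseStepA]
        rw [List.foldl, hstep, escToks]
        have hp := (ih cs' hlen').1 (t ++ [String.ofList [c]]) [] (by simp)
        simpa using hp

-- ===== VERDICT (by name: the statement is the Claim_ definition above) =====
theorem parse_spec : Claim_equal_parse := by
  intro text _
  unfold Spec_parse parse parse_alt
  have h := (mainPQ text.toList.length text.toList le_rfl).1 [] [] (by simp)
  simpa [Bfrom] using h
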